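-- pv_equiv track=rewrite | github.com/tsao100/Kanji-Convert | make_kandat.py | pack_to_records
-- ===== SOURCE A (Python) =====
-- INTS_PER   = 16     # int16 per record
--
-- DATA_INTS  = 15     # data words per record (word 15 = chain ptr)
--
-- MAX_RECS   = 8      # チェーン最大レコード数 (BASIC: NR < 8)
--
-- def pack_to_records(ip_values: list[int]) -> list[list[int]]:
--     """IP 値リストを 16-int レコードリスト (チェーン=0 初期化) に変換。
--
--     レコード構造:
--       Word 0..14 : データ (最初レコードの Word 0 = NPKAN カウント)
--       Word 15    : チェーンポインター (スロット番号, 0=終端)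
--
--     最大 8 レコードチェーン: count(1) + 14 + 7×15 = 120 語 → IP 最大 119 個。
--     """
--     max_pts = MAX_RECS * DATA_INTS - 1   # 8×15-1 = 119
--     if len(ip_values) > max_pts:
--         ip_values = ip_values[:max_pts]
--
--     # データストリーム: [count, ip1, ip2, ...]
--     stream = [len(ip_values)] + ip_values
--
--     records = []
--     for i in range(0, len(stream), DATA_INTS):
--         chunk = stream[i : i + DATA_INTS]
--         chunk += [0] * (DATA_INTS - len(chunk))  # パディング
--         records.append(chunk + [0])               # chain=0 (後で設定)
--
--     if not records:
--         records = [[0] * INTS_PER]   # 空文字: count=0 のみ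
--
--     return records
-- ===== SOURCE B (Python) =====
-- def pack_to_records(ip_values: list[int]) -> list[list[int]]:
--     """IP values -> 16-int records: index-scatter into a pre-allocated zero grid."""
--     vals = ip_values[:119]
--     stream = [len(vals)] + vals
--     nrec = (len(stream) + 14) // 15
--     records = [[0] * 16 for _ in range(nrec)]
--     for idx, val in enumerate(stream):
--         records[idx // 15][idx % 15] = val
--     return records
-- ===== Notes on version B (the rewrite author's own statement) =====
-- stated objective: simpler
-- what changed: Replaced A's slice-chunk-and-pad loop (with its dead empty-records fallback) by computing nrec = ceil(len(stream)/15), pre-allocating an nrec x 16 zero grid, and scattering each stream value to records[idx//15][idx%15] in one enumerate pass.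
import Mathlib
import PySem

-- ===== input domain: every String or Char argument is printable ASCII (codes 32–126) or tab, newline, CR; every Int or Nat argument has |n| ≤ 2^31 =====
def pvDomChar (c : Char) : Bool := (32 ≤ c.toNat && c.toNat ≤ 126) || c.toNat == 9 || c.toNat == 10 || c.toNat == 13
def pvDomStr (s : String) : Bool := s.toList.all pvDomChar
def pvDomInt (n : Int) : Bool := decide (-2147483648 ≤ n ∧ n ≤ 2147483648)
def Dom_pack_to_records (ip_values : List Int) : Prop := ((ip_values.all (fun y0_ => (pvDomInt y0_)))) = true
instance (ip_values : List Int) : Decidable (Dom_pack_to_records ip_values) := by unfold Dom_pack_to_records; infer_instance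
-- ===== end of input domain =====

-- B replaces A's chunk-slicing-plus-padding loop by one index-scatter pass into a
-- pre-allocated zero grid (objective: simpler — same O(n) cost, shorter code).

-- ===== PORT A =====
def pack_to_records (ip_values : List Int) : List (List Int) :=
  let max_pts : Int := 8 * 15 - 1
  let ip_values :=
    if (ip_values.length : Int) > max_pts then PySem.List.slice ip_values (some 0) (some max_pts)
    else ip_values
  let stream : List Int := (ip_values.length : Int) :: ip_values
  let records :=
    (PySem.List.pyRange 0 (stream.length : Int) 15).foldl
      (fun recs i =>
        let chunk := PySem.List.slice stream (some i) (some (i + 15))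
        let chunk := chunk ++ List.replicate (15 - chunk.length) (0 : Int)
        recs ++ [chunk ++ [0]]) []
  if records.isEmpty then [List.replicate 16 (0 : Int)] else records

-- ===== PORT B =====
def pack_to_records_alt (ip_values : List Int) : List (List Int) :=
  let vals := PySem.List.slice ip_values (some 0) (some 119)
  let stream : List Int := (vals.length : Int) :: vals
  let nrec : Nat := (stream.length + 14) / 15
  let records : List (List Int) := (List.range nrec).map (fun _ => List.replicate 16 (0 : Int))
  (PySem.List.enumerate stream).foldl
    (fun recs p =>
      PySem.List.pySetD recs (PySem.Int.floordiv p.1 15)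
        (PySem.List.pySetD (PySem.List.pyGetD recs (PySem.Int.floordiv p.1 15) [])
          (PySem.Int.mod p.1 15) p.2))
    records

-- ===== PRECONDITION & SPEC =====
def Spec_pack_to_records (ip_values : List Int) (out : List (List Int)) : Prop := out = pack_to_records_alt ip_values
instance (ip_values : List Int) (out : List (List Int)) : Decidable (Spec_pack_to_records ip_values out) := by unfold Spec_pack_to_records; infer_instance

-- ===== CLAIM (what is proved, stated in full; the proofs are below) =====
def Claim_equal_pack_to_records : Prop := ∀ (ip_values : List Int), Dom_pack_to_records ip_values → Spec_pack_to_records ip_values (pack_to_records ip_values)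

-- ===== LEMMAS AND PROOFS =====

/-- Row `r` of the packed result for data stream `s`: 15 data words then the 0 chain word. -/
def pvRowOf (s : List Int) (r : Nat) : List Int :=
  (List.range 16).map (fun j => if j < 15 ∧ 15 * r + j < s.length then s.getD (15 * r + j) 0 else 0)

/-- A's record for chunk `k` (slice, pad to 15, chain word 0) is `pvRowOf`. -/
lemma pvRowA_eq (s : List Int) (k : Nat) :
    ((PySem.List.slice s (some ((15 : Int) * k)) (some ((15 : Int) * k + 15))
        ++ List.replicate (15 - (PySem.List.slice s (some ((15 : Int) * k)) (some ((15 : Int) * k + 15))).length) (0 : Int))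
      ++ [(0 : Int)]) = pvRowOf s k := by
  have hsl : PySem.List.slice s (some ((15 : Int) * k)) (some ((15 : Int) * k + 15))
      = (s.drop (15 * k)).take 15 := by
    have := PySem.List.slice_natCast_add s (15 * k) 15
    push_cast at this
    convert this using 3
  rw [hsl]
  have hlen : ((s.drop (15 * k)).take 15).length = min 15 (s.length - 15 * k) := by simp
  apply List.ext_getElem
  · simp [pvRowOf]; omega
  · intro i h1 h2
    simp only [pvRowOf, List.getElem_map, List.getElem_range]
    by_cases hi : i < min 15 (s.length - 15 * k)
    · rw [List.getElem_append_left (by simp; omega), List.getElem_append_left (by omega)]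
      rw [List.getElem_take, List.getElem_drop]
      rw [if_pos (by omega)]
      rw [List.getD_eq_getElem _ _ (by omega)]
    · rw [if_neg (by omega)]
      by_cases hi2 : i < 15
      · rw [List.getElem_append_left (by simp; omega), List.getElem_append_right (by omega)]
        simp
      · rw [List.getElem_append_right (by simp; omega)]
        simp

/-- B's scatter pass over `enumerate s` fills the zero grid with exactly the rows `pvRowOf s`. -/
lemma pvScatter_inv (s : List Int) (n : Nat) (h : s.length ≤ 15 * n) :
    (PySem.List.enumerate s).foldl
      (fun recs p =>
        PySem.List.pySetD recs (PySem.Int.floordiv p.1 15)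
          (PySem.List.pySetD (PySem.List.pyGetD recs (PySem.Int.floordiv p.1 15) [])
            (PySem.Int.mod p.1 15) p.2))
      ((List.range n).map (fun _ => List.replicate 16 (0 : Int)))
    = (List.range n).map (pvRowOf s) := by
  induction s using List.reverseRecOn with
  | nil =>
      rw [PySem.List.enumerate_nil]
      simp only [List.foldl_nil]
      apply List.map_congr_left
      intro r hr
      simp [pvRowOf]
  | append_singleton s x ih =>
      rw [PySem.List.enumerate_append, List.foldl_append,
        ih (by simp at h ⊢; omega)]
      simp only [PySem.List.enumerate, List.foldl]
      have hq : PySem.Int.floordiv (0 + (s.length : Int)) 15 = ((s.length / 15 : Nat) : Int) := by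
        rw [PySem.Int.floordiv_eq_ediv_of_pos (by omega)]
        rw [Int.natCast_div]
        norm_num
      have hm : PySem.Int.mod (0 + (s.length : Int)) 15 = ((s.length % 15 : Nat) : Int) := by
        rw [PySem.Int.mod_eq_emod_of_pos (by omega)]
        push_cast
        norm_num
      rw [hq, hm]
      have hqn : s.length / 15 < n := by simp at h; omega
      rw [PySem.List.pyGetD_natCast, PySem.List.getD_map_range _ _ _ _ hqn]
      rw [PySem.List.pySetD_natCast, PySem.List.pySetD_natCast]
      apply List.ext_getElem
      · simp
      · intro r hr1 hr2
        simp only [List.length_set, List.length_map, List.length_range] at hr1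
        rw [List.getElem_set]
        rw [List.getElem_map, List.getElem_range]
        by_cases hrq : s.length / 15 = r
        · rw [if_pos hrq]
          subst hrq
          apply List.ext_getElem
          · simp [pvRowOf]
          · intro j hj1 hj2
            rw [List.getElem_set]
            simp only [pvRowOf, List.getElem_map, List.getElem_range]
            by_cases hjm : s.length % 15 = j
            · rw [if_pos hjm]
              rw [if_pos (by simp; omega)]
              rw [List.getD_eq_getElem _ _ (by simp; omega)]
              rw [List.getElem_append_right (by omega)]
              have hix : 15 * (s.length / 15) + j - s.length = 0 := by omega
              simp [hix]
            · rw [if_neg (by omega)]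
              by_cases hin : j < 15 ∧ 15 * (s.length / 15) + j < s.length
              · rw [if_pos hin, if_pos (by simp; omega)]
                rw [List.getD_eq_getElem _ _ hin.2, List.getD_eq_getElem _ _ (by simp; omega)]
                rw [List.getElem_append_left hin.2]
              · rw [if_neg hin, if_neg (by simp at hin ⊢; omega)]
        · rw [if_neg hrq]
          rw [List.getElem_map, List.getElem_range]
          apply List.ext_getElem
          · simp [pvRowOf]
          · intro j hj1 hj2
            simp only [pvRowOf, List.getElem_map, List.getElem_range,
              List.length_map, List.length_range] at hj1 hj2 ⊢
            by_cases hin : j < 15 ∧ 15 * r + j < s.length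
            · rw [if_pos hin, if_pos (by simp; omega)]
              rw [List.getD_eq_getElem _ _ hin.2, List.getD_eq_getElem _ _ (by simp; omega)]
              rw [List.getElem_append_left hin.2]
            · rw [if_neg hin, if_neg (by simp at hin ⊢; omega)]

/-- A's chunk loop (as a `flatMap`/`map` over `pyRange`) produces the rows `pvRowOf`. -/
lemma pvChunks_eq (s : List Int) (hs : s ≠ []) :
    (PySem.List.pyRange 0 (s.length : Int) 15).foldl
      (fun recs i =>
        let chunk := PySem.List.slice s (some i) (some (i + 15))
        let chunk := chunk ++ List.replicate (15 - chunk.length) (0 : Int)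
        recs ++ [chunk ++ [0]]) []
    = (List.range ((s.length + 14) / 15)).map (pvRowOf s) := by
  have hL : 1 ≤ s.length := List.length_pos_iff.mpr hs
  rw [PySem.List.foldl_append_eq_flatMap]
  rw [PySem.List.pyRange_of_pos _ _ (by norm_num)]
  rw [if_pos (by exact_mod_cast hL)]
  have hn : (((s.length : Int) - 0 + 15 - 1) / 15).toNat = (s.length + 14) / 15 := by omega
  rw [hn, List.nil_append]
  have key : ∀ l : List Nat,
      (l.map (fun k : Nat => (0 : Int) + 15 * (k : Int))).flatMap (fun i =>
        let chunk := PySem.List.slice s (some i) (some (i + 15))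
        let chunk := chunk ++ List.replicate (15 - chunk.length) (0 : Int)
        [chunk ++ [0]])
      = l.map (pvRowOf s) := by
    intro l
    induction l with
    | nil => rfl
    | cons a t iht =>
        simp only [List.map_cons, List.flatMap_cons, List.singleton_append, iht]
        congr 1
        have h15 := pvRowA_eq s a
        rw [show ((0 : Int) + 15 * (a : Int)) = (15 : Int) * a by ring]
        exact h15
  exact key _

-- ===== VERDICT (by name: the statement is the Claim_ definition above) =====
theorem pack_to_records_spec : Claim_equal_pack_to_records := by
  intro ip_values _
  show pack_to_records ip_values = pack_to_records_alt ip_values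
  unfold pack_to_records pack_to_records_alt
  have h119 : PySem.List.slice ip_values (some 0) (some 119) = ip_values.take 119 := by
    rw [PySem.List.slice_zero_start, PySem.List.slice_to ip_values (by norm_num)]
    rfl
  have h119' : PySem.List.slice ip_values (some 0) (some (8 * 15 - 1)) = ip_values.take 119 := by
    rw [PySem.List.slice_zero_start, PySem.List.slice_to ip_values (by norm_num)]
    rfl
  have hvals :
      (if ((ip_values.length : Int) > 8 * 15 - 1) then PySem.List.slice ip_values (some 0) (some (8 * 15 - 1))
       else ip_values) = PySem.List.slice ip_values (some 0) (some 119) := by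
    rw [h119]
    split_ifs with hgt
    · exact h119'
    · exact (List.take_of_length_le (by push_cast at hgt; omega)).symm
  simp only [hvals]
  set vals := PySem.List.slice ip_values (some 0) (some 119) with hv
  set s : List Int := (vals.length : Int) :: vals with hsdef
  have hs : s ≠ [] := by simp [hsdef]
  have hlen : s.length = vals.length + 1 := by simp [hsdef]
  rw [pvChunks_eq s hs, pvScatter_inv s ((s.length + 14) / 15) (by omega)]
  rw [if_neg (by simp [List.isEmpty_iff]; omega)]
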